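-- pv_equiv track=rewrite | github.com/Xiangjun99/Spatial-GT-seq | Single cell DNA-seq/preprocess2.py | process_fastq_chunk
-- ===== SOURCE A (Python) =====
-- from collections import defaultdict
--
-- def is_one_char_different(s1, s2):
--     """
--     Check if two strings of equal length differ by exactly one character.
--     """
--     if len(s1) != len(s2):
--         return False
--     diff_count = sum(1 for a, b in zip(s1, s2) if a != b)
--     return diff_count == 1
--
-- def process_fastq_chunk(lines, candidate_barcodes):
--     """
--     Process a chunk of FASTQ lines, extracting and correcting barcodes.
--
--     Args:
--         lines (list[str]): FASTQ lines chunk (multiples of 4).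
--         candidate_barcodes (list[str]): Valid barcode sequences.
--
--     Returns:
--         dict[str, list[str]]: Mapping from combined cell barcode to list of read names.
--     """
--     cell_barcodes = defaultdict(list)
--     for i in range(0, len(lines), 4):
--         try:
--             read_name = lines[i].strip()
--             sequence = lines[i + 1].strip()
--
--             # Extract barcode segments from sequence
--             barcode1 = sequence[76:84]  # Barcode1 at positions 76-83
--             barcode2 = sequence[38:46]  # Barcode2 at positions 38-45
--             barcode3 = sequence[0:8]    # Barcode3 at positions 0-7
--
--             corrected = []
--             for bc in (barcode1, barcode2, barcode3):
--                 if bc in candidate_barcodes: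
--                     corrected.append(bc)
--                 else:
--                     # Attempt single-character correction
--                     match = next((cb for cb in candidate_barcodes if is_one_char_different(bc, cb)), None)
--                     corrected.append(match)
--
--             if all(corrected):  # All three barcodes valid or corrected
--                 cell_bc = ''.join(corrected)
--                 # Remove '@' and any trailing metadata
--                 clean_name = read_name.lstrip('@').split(' ')[0]
--                 cell_barcodes[cell_bc].append(clean_name)
--         except IndexError:
--             break
--     return cell_barcodes
-- ===== SOURCE B (Python) =====
-- def process_fastq_chunk(lines, candidate_barcodes):
--     """
--     Same result as A, but correction uses a precomputed deletion-neighborhood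
--     index: for every candidate and every position, the candidate with that one
--     position deleted is keyed to the first (smallest-index) candidate carrying
--     it, so correcting a barcode scans its own length instead of the whole
--     candidate list.
--     """
--     exact = set(candidate_barcodes)
--     index = {}
--     for j, cb in enumerate(candidate_barcodes):
--         for p in range(len(cb)):
--             key = (p, cb[:p] + cb[p + 1:])
--             if key not in index:
--                 index[key] = (j, cb)
--     def correct(bc):
--         if bc in exact:
--             return bc
--         best = None
--         for p in range(len(bc)):
--             hit = index.get((p, bc[:p] + bc[p + 1:]))
--             if hit is not None and (best is None or hit[0] < best[0]):
--                 best = hit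
--         return None if best is None else best[1]
--     result = {}
--     k = 0
--     while 4 * k + 1 < len(lines):
--         name = lines[4 * k].strip()
--         seq = lines[4 * k + 1].strip()
--         parts = [correct(seq[76:84]), correct(seq[38:46]), correct(seq[0:8])]
--         if all(parts):
--             cell = ''.join(parts)
--             clean = name.lstrip('@').split(' ')[0]
--             result.setdefault(cell, []).append(clean)
--         k += 1
--     return result
-- ===== Notes on version B (the rewrite author's own statement) =====
-- stated objective: faster
-- what changed: B replaces the per-barcode linear scan of all candidates (membership test plus next() over is_one_char_different) with a set for exact matches and a deletion-neighborhood index built once (each candidate keyed by every one-character deletion, first candidate wins), so correcting a barcode costs O(L) dictionary lookups instead of O(N*L).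
import Mathlib
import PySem

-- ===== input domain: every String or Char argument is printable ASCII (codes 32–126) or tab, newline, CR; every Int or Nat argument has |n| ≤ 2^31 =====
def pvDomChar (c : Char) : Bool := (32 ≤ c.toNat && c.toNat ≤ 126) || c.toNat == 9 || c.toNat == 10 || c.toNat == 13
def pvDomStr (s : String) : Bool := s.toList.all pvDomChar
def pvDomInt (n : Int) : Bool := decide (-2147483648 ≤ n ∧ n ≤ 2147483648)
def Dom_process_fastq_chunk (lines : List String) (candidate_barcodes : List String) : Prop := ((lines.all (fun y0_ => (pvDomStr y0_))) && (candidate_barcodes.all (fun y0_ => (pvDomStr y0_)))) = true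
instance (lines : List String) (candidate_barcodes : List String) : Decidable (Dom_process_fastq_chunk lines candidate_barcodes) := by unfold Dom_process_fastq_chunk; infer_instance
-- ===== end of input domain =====

-- B replaces A's per-barcode scan of all candidates with a set for exact matches and a
-- one-deletion index built once over the candidates; same return value, faster correction.

-- ===== PORT A =====
def is_one_char_different (s1 s2 : String) : Bool :=
  if PySem.Str.len s1 ≠ PySem.Str.len s2 then false
  else ((s1.toList.zip s2.toList).foldl
          (fun n ab => if ab.1 ≠ ab.2 then n + (1 : Int) else n) 0) == 1

-- body of A's for-loop over one FASTQ record (lines[i], lines[i+1] already fetched);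
-- defaultdict(list)[k].append(v) is Dict.modify k [] (· ++ [v]);
-- read_name.lstrip('@') is dropWhile (· == '@') on the characters (exact);
-- split(' ') with a nonempty separator always yields ≥ 1 piece, so [0] is headD
def pvAStep (candidate_barcodes : List String) (d : PySem.Dict String (List String))
    (l0 l1 : String) : PySem.Dict String (List String) :=
  let read_name := PySem.Str.strip l0
  let sequence := PySem.Str.strip l1
  let barcode1 := PySem.Str.slice sequence (some 76) (some 84)
  let barcode2 := PySem.Str.slice sequence (some 38) (some 46)
  let barcode3 := PySem.Str.slice sequence (some 0) (some 8)
  let corrected := [barcode1, barcode2, barcode3].foldl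
    (fun acc bc =>
      if candidate_barcodes.contains bc then acc ++ [some bc]
      else acc ++ [candidate_barcodes.find? (fun cb => is_one_char_different bc cb)]) []
  -- all(corrected): every element non-None and (as a string) non-empty
  if corrected.all (fun c => match c with | some s => !(s == "") | none => false) then
    let cell_bc := PySem.Str.join "" (corrected.filterMap id)
    let clean_name :=
      String.ofList ((PySem.Chars.splitOn (read_name.toList.dropWhile (· == '@')) [' ']).headD [])
    d.modify cell_bc [] (· ++ [clean_name])
  else d

-- for i in range(0, len(lines), 4) with try/except IndexError: break
def pvALoop (lines candidate_barcodes : List String) :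
    List Int → PySem.Dict String (List String) → PySem.Dict String (List String)
  | [], d => d
  | i :: rest, d =>
    match PySem.List.pyGet? lines i, PySem.List.pyGet? lines (i + 1) with
    | some l0, some l1 => pvALoop lines candidate_barcodes rest (pvAStep candidate_barcodes d l0 l1)
    | _, _ => d   -- IndexError → break

def process_fastq_chunk (lines : List String) (candidate_barcodes : List String) :
    List (String × List String) :=
  (pvALoop lines candidate_barcodes (PySem.List.pyRange 0 (PySem.List.len lines) 4)
    PySem.Dict.empty).items

-- ===== PORT B =====
-- cb[:p] + cb[p+1:] on the character list
def pvDel (cs : List Char) (p : Nat) : List Char := cs.take p ++ cs.drop (p + 1)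

-- inner loop of the index build: insert every deletion key of candidate cb if absent
def pvInsertKeys (j : Nat) (cb : String) (ps : List Nat)
    (d : PySem.Dict (Nat × List Char) (Nat × String)) :
    PySem.Dict (Nat × List Char) (Nat × String) :=
  ps.foldl (fun d p =>
    if d.contains (p, pvDel cb.toList p) then d
    else d.insert (p, pvDel cb.toList p) (j, cb)) d

def pvBuildIndex (candidate_barcodes : List String) :
    PySem.Dict (Nat × List Char) (Nat × String) :=
  candidate_barcodes.zipIdx.foldl
    (fun d cj => pvInsertKeys cj.2 cj.1 (List.range cj.1.toList.length) d) PySem.Dict.empty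

-- keep the hit with the smaller candidate index
def pvBetter (best hit : Option (Nat × String)) : Option (Nat × String) :=
  match hit with
  | none => best
  | some h =>
    match best with
    | none => some h
    | some b => if h.1 < b.1 then some h else some b

def pvCorrect (exact : PySem.Set String)
    (index : PySem.Dict (Nat × List Char) (Nat × String)) (bc : String) : Option String :=
  if PySem.Set.contains exact bc then some bc
  else
    ((List.range bc.toList.length).foldl
        (fun best p => pvBetter best (index.get? (p, pvDel bc.toList p))) none).map (·.2)

-- while 4*k+1 < len(lines); result.setdefault(cell, []).append(clean) is modify cell [] (· ++ [clean])
def pvBLoop (lines : List String) (exact : PySem.Set String)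
    (index : PySem.Dict (Nat × List Char) (Nat × String)) (k : Nat)
    (res : PySem.Dict String (List String)) : PySem.Dict String (List String) :=
  if h : 4 * k + 1 < lines.length then
    let name := PySem.Str.strip (lines[4 * k]'(by omega))
    let seq := PySem.Str.strip (lines[4 * k + 1]'h)
    let parts := [pvCorrect exact index (PySem.Str.slice seq (some 76) (some 84)),
                  pvCorrect exact index (PySem.Str.slice seq (some 38) (some 46)),
                  pvCorrect exact index (PySem.Str.slice seq (some 0) (some 8))]
    let res' :=
      if parts.all (fun c => match c with | some s => !(s == "") | none => false) then
        res.modify (PySem.Str.join "" (parts.filterMap id)) []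
          (· ++ [String.ofList ((PySem.Chars.splitOn (name.toList.dropWhile (· == '@')) [' ']).headD [])])
      else res
    pvBLoop lines exact index (k + 1) res'
  else res
termination_by lines.length - 4 * k

def process_fastq_chunk_alt (lines : List String) (candidate_barcodes : List String) :
    List (String × List String) :=
  (pvBLoop lines (PySem.Set.ofList candidate_barcodes) (pvBuildIndex candidate_barcodes)
    0 PySem.Dict.empty).items

-- ===== PRECONDITION & SPEC =====
def Spec_process_fastq_chunk (lines : List String) (candidate_barcodes : List String) (out : List (String × List String)) : Prop := out = process_fastq_chunk_alt lines candidate_barcodes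
instance (lines : List String) (candidate_barcodes : List String) (out : List (String × List String)) : Decidable (Spec_process_fastq_chunk lines candidate_barcodes out) := by unfold Spec_process_fastq_chunk; infer_instance

-- ===== CLAIM (what is proved, stated in full; the proofs are below) =====
def Claim_equal_process_fastq_chunk : Prop := ∀ (lines : List String) (candidate_barcodes : List String), Dom_process_fastq_chunk lines candidate_barcodes → Spec_process_fastq_chunk lines candidate_barcodes (process_fastq_chunk lines candidate_barcodes)

-- ===== LEMMAS AND PROOFS =====

-- A's correction of one barcode as a function: membership, else first one-char-different candidate
def pvACorrect (candidate_barcodes : List String) (bc : String) : Option String :=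
  if candidate_barcodes.contains bc then some bc
  else candidate_barcodes.find? (fun cb => is_one_char_different bc cb)

-- cb generates key k (k.1 < |cb| and deleting position k.1 from cb gives k.2)
def pvKeyMatch (k : Nat × List Char) (cb : String) : Bool :=
  decide (k.1 < cb.toList.length ∧ pvDel cb.toList k.1 = k.2)

-- the outer index-building fold, from an arbitrary starting dict
def pvFoldIndex (prs : List (String × Nat)) (d : PySem.Dict (Nat × List Char) (Nat × String)) :
    PySem.Dict (Nat × List Char) (Nat × String) :=
  prs.foldl (fun d cj => pvInsertKeys cj.2 cj.1 (List.range cj.1.toList.length) d) d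

theorem pvDel_zero_cons (a : Char) (t : List Char) : pvDel (a :: t) 0 = t := by
  simp [pvDel]

theorem pvDel_cons_succ (a : Char) (t : List Char) (p : Nat) :
    pvDel (a :: t) (p + 1) = a :: pvDel t p := by
  simp [pvDel]

theorem pvInsertKeys_get?_of_contains (j : Nat) (cb : String) (ps : List Nat)
    (d : PySem.Dict (Nat × List Char) (Nat × String)) (k : Nat × List Char)
    (h : d.contains k = true) : (pvInsertKeys j cb ps d).get? k = d.get? k := by
  induction ps generalizing d with
  | nil => rfl
  | cons p ps ih =>
    have hstep : pvInsertKeys j cb (p :: ps) d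
        = pvInsertKeys j cb ps
            (if d.contains (p, pvDel cb.toList p) then d
             else d.insert (p, pvDel cb.toList p) (j, cb)) := rfl
    rw [hstep]
    by_cases hc : d.contains (p, pvDel cb.toList p) = true
    · rw [if_pos hc]; exact ih d h
    · rw [if_neg hc]
      have hne : k ≠ (p, pvDel cb.toList p) := by
        intro e; rw [e] at h; exact hc h
      have h' : (d.insert (p, pvDel cb.toList p) (j, cb)).contains k = true := by
        rw [PySem.Dict.contains_insert]; simp [h]
      rw [ih _ h', PySem.Dict.get?_insert_of_ne _ _ hne]

theorem pvKeyMatch_range_iff (k : Nat × List Char) (cb : String) :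
    (∃ p ∈ List.range cb.toList.length, k = (p, pvDel cb.toList p)) ↔ pvKeyMatch k cb = true := by
  simp only [pvKeyMatch, List.mem_range, decide_eq_true_eq]
  constructor
  · rintro ⟨p, hp, rfl⟩
    exact ⟨hp, rfl⟩
  · rintro ⟨h1, h2⟩
    exact ⟨k.1, h1, by rw [h2]⟩

theorem pvInsertKeys_get?_of_not_contains (j : Nat) (cb : String) (ps : List Nat)
    (d : PySem.Dict (Nat × List Char) (Nat × String)) (k : Nat × List Char)
    (h : d.contains k = false) :
    (pvInsertKeys j cb ps d).get? k =
      if ∃ p ∈ ps, k = (p, pvDel cb.toList p) then some (j, cb) else none := by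
  induction ps generalizing d with
  | nil =>
    simp only [pvInsertKeys, List.foldl_nil, List.not_mem_nil]
    rw [(PySem.Dict.get?_eq_none_iff_contains _ _).mpr h]
    simp
  | cons p ps ih =>
    have hstep : pvInsertKeys j cb (p :: ps) d
        = pvInsertKeys j cb ps
            (if d.contains (p, pvDel cb.toList p) then d
             else d.insert (p, pvDel cb.toList p) (j, cb)) := rfl
    rw [hstep]
    by_cases hk : k = (p, pvDel cb.toList p)
    · have hc : d.contains (p, pvDel cb.toList p) = false := hk ▸ h
      rw [if_neg (by simp [hc])]
      have h' : (d.insert (p, pvDel cb.toList p) (j, cb)).contains k = true := by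
        rw [hk, PySem.Dict.contains_insert_self]
      rw [pvInsertKeys_get?_of_contains _ _ _ _ _ h', hk, PySem.Dict.get?_insert_self]
      rw [if_pos ⟨p, List.mem_cons_self .., rfl⟩]
    · have hmem : (∃ q ∈ p :: ps, k = (q, pvDel cb.toList q))
          ↔ (∃ q ∈ ps, k = (q, pvDel cb.toList q)) := by
        constructor
        · rintro ⟨q, hq, he⟩
          rcases List.mem_cons.mp hq with rfl | hq'
          · exact absurd he hk
          · exact ⟨q, hq', he⟩
        · rintro ⟨q, hq, he⟩; exact ⟨q, List.mem_cons_of_mem _ hq, he⟩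
      rw [if_congr hmem rfl rfl]
      by_cases hc : d.contains (p, pvDel cb.toList p) = true
      · rw [if_pos hc]; exact ih d h
      · rw [if_neg hc]
        have h' : (d.insert (p, pvDel cb.toList p) (j, cb)).contains k = false := by
          rw [PySem.Dict.contains_insert]
          simp only [h, Bool.or_false]
          exact beq_eq_false_iff_ne.mpr hk
        exact ih _ h'

theorem pvFoldIndex_get? (prs : List (String × Nat))
    (d : PySem.Dict (Nat × List Char) (Nat × String)) (k : Nat × List Char) :
    (pvFoldIndex prs d).get? k
      = (d.get? k).or
          ((prs.find? (fun cj => pvKeyMatch k cj.1)).map (fun cj => (cj.2, cj.1))) := by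
  induction prs generalizing d with
  | nil => simp [pvFoldIndex]
  | cons c t ih =>
    have hstep : pvFoldIndex (c :: t) d
        = pvFoldIndex t (pvInsertKeys c.2 c.1 (List.range c.1.toList.length) d) := rfl
    rw [hstep, ih]
    by_cases hc : d.contains k = true
    · rw [pvInsertKeys_get?_of_contains _ _ _ _ _ hc]
      have : (d.get? k).isSome := by rw [← PySem.Dict.contains_eq_isSome_get?]; exact hc
      obtain ⟨v, hv⟩ := Option.isSome_iff_exists.mp this
      simp [hv]
    · have hcf : d.contains k = false := by simpa using hc
      have hd : d.get? k = none := (PySem.Dict.get?_eq_none_iff_contains _ _).mpr hcf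
      rw [pvInsertKeys_get?_of_not_contains _ _ _ _ _ hcf, hd, List.find?_cons]
      by_cases hm : pvKeyMatch k c.1 = true
      · rw [if_pos ((pvKeyMatch_range_iff k c.1).mpr hm)]
        simp [hm]
      · have hmf : pvKeyMatch k c.1 = false := by simpa using hm
        rw [if_neg (fun he => hm ((pvKeyMatch_range_iff k c.1).mp he))]
        simp [hmf]

theorem pvBuildIndex_get? (candidate_barcodes : List String) (k : Nat × List Char) :
    (pvBuildIndex candidate_barcodes).get? k =
      (candidate_barcodes.zipIdx.find? (fun cj => pvKeyMatch k cj.1)).map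
        (fun cj => (cj.2, cj.1)) := by
  have h : pvBuildIndex candidate_barcodes
      = pvFoldIndex candidate_barcodes.zipIdx PySem.Dict.empty := rfl
  rw [h, pvFoldIndex_get?]
  simp [PySem.Dict.get?_empty]

theorem pvFind?_congr {α : Type} (l : List α) (p q : α → Bool)
    (h : ∀ x ∈ l, p x = q x) : l.find? p = l.find? q := by
  induction l with
  | nil => rfl
  | cons a t ih =>
    rw [List.find?_cons, List.find?_cons, h a (List.mem_cons_self ..)]
    cases q a
    · exact ih (fun x hx => h x (List.mem_cons_of_mem _ hx))
    · rfl

theorem pvMem_zipIdx {α : Type} (l : List α) (n : Nat) (c : α × Nat)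
    (h : c ∈ l.zipIdx n) : c.1 ∈ l ∧ n ≤ c.2 := by
  induction l generalizing n with
  | nil => simp at h
  | cons a t ih =>
    rw [List.zipIdx_cons] at h
    rcases List.mem_cons.mp h with rfl | h'
    · exact ⟨List.mem_cons_self .., le_refl _⟩
    · obtain ⟨h1, h2⟩ := ih (n + 1) h'
      exact ⟨List.mem_cons_of_mem _ h1, by omega⟩

theorem pvZipIdx_pairwise {α : Type} (l : List α) (n : Nat) :
    (l.zipIdx n).Pairwise (fun x y => x.2 < y.2) := by
  induction l generalizing n with
  | nil => simp
  | cons a t ih =>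
    rw [List.zipIdx_cons, List.pairwise_cons]
    exact ⟨fun y hy => by have := (pvMem_zipIdx t (n + 1) y hy).2; omega, ih (n + 1)⟩

theorem pvFind?_zipIdx {α : Type} (l : List α) (p : α → Bool) (n : Nat) :
    ((l.zipIdx n).find? (fun cj => p cj.1)).map (fun cj => cj.1) = l.find? p := by
  induction l generalizing n with
  | nil => rfl
  | cons a t ih =>
    rw [List.zipIdx_cons, List.find?_cons, List.find?_cons]
    cases hp : p a
    · simpa using ih (n + 1)
    · rfl

theorem pvBetter_find (e : List (String × Nat)) (hinc : e.Pairwise (fun x y => x.2 < y.2))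
    (R Q : (String × Nat) → Bool) :
    pvBetter ((e.find? R).map (fun cj => (cj.2, cj.1))) ((e.find? Q).map (fun cj => (cj.2, cj.1)))
      = (e.find? (fun c => R c || Q c)).map (fun cj => (cj.2, cj.1)) := by
  induction e with
  | nil => rfl
  | cons c t ih =>
    rw [List.pairwise_cons] at hinc
    obtain ⟨hlt, hp⟩ := hinc
    rw [List.find?_cons, List.find?_cons, List.find?_cons]
    cases hR : R c <;> cases hQ : Q c <;> simp only [Bool.false_or, Bool.true_or, Bool.or_self]
    · exact ih hp
    · cases hfb : t.find? R with
      | none => simp [pvBetter]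
      | some b =>
        have hb : c.2 < b.2 := hlt b (List.mem_of_find?_eq_some hfb)
        simp [pvBetter, hb]
    · cases hfq : t.find? Q with
      | none => simp [pvBetter]
      | some b =>
        have hb : c.2 < b.2 := hlt b (List.mem_of_find?_eq_some hfq)
        simp [pvBetter, Nat.not_lt.mpr (Nat.le_of_lt hb)]
    · simp [pvBetter]

theorem pvFoldBest (e : List (String × Nat)) (hinc : e.Pairwise (fun x y => x.2 < y.2))
    (Qf : Nat → (String × Nat) → Bool) (ps : List Nat) :
    ∀ R : (String × Nat) → Bool,
    ps.foldl (fun best p => pvBetter best ((e.find? (Qf p)).map (fun cj => (cj.2, cj.1))))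
        ((e.find? R).map (fun cj => (cj.2, cj.1)))
      = (e.find? (fun c => R c || ps.any (fun p => Qf p c))).map (fun cj => (cj.2, cj.1)) := by
  induction ps with
  | nil =>
    intro R
    simp only [List.foldl_nil, List.any_nil, Bool.or_false]
  | cons p ps ih =>
    intro R
    rw [List.foldl_cons, pvBetter_find e hinc R (Qf p), ih (fun c => R c || Qf p c)]
    exact congrArg _ (pvFind?_congr e
      (fun c => (R c || Qf p c) || ps.any fun q => Qf q c)
      (fun c => R c || (p :: ps).any fun q => Qf q c)
      (fun x _ => by cases R x <;> cases Qf p x <;> simp [List.any_cons, Bool.or_assoc]))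

theorem pvZipCount_zero (l1 l2 : List Char) :
    (l1.length = l2.length ∧ (l1.zip l2).countP (fun ab => decide (ab.1 ≠ ab.2)) = 0) ↔ l2 = l1 := by
  induction l1 generalizing l2 with
  | nil => cases l2 <;> simp
  | cons a t1 ih =>
    cases l2 with
    | nil => simp
    | cons b t2 =>
      simp only [List.zip_cons_cons, List.countP_cons, List.length_cons]
      constructor
      · rintro ⟨hl, hc⟩
        by_cases hab : a = b
        · subst hab
          have hz : (decide (a ≠ a) : Bool) = false := by simp
          rw [hz, if_neg Bool.false_ne_true, Nat.add_zero] at hc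
          rw [(ih t2).mp ⟨by omega, hc⟩]
        · exfalso
          simp [hab] at hc
      · intro h
        injection h with h1 h2
        subst h2
        have hz : (decide (a ≠ b) : Bool) = false := by simp [h1.symm]
        rw [hz, if_neg Bool.false_ne_true, Nat.add_zero]
        exact ⟨rfl, ((ih t2).mpr rfl).2⟩

theorem pvOneDiff_iff (l1 l2 : List Char) (hne : l2 ≠ l1) :
    (∃ p, p < l1.length ∧ p < l2.length ∧ pvDel l2 p = pvDel l1 p)
      ↔ (l1.length = l2.length ∧ (l1.zip l2).countP (fun ab => decide (ab.1 ≠ ab.2)) = 1) := by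
  induction l1 generalizing l2 with
  | nil =>
    constructor
    · rintro ⟨p, hp, -, -⟩; simp at hp
    · rintro ⟨hl, hc⟩
      rw [List.length_nil] at hl
      rw [List.length_eq_zero_iff.mp hl.symm] at hc
      simp at hc
  | cons a t1 ih =>
    cases l2 with
    | nil =>
      constructor
      · rintro ⟨p, -, hp2, -⟩; simp at hp2
      · rintro ⟨hl, -⟩; simp at hl
    | cons b t2 =>
      simp only [List.length_cons, List.zip_cons_cons, List.countP_cons]
      constructor
      · rintro ⟨p, hp1, hp2, hdel⟩
        cases p with
        | zero =>
          rw [pvDel_zero_cons, pvDel_zero_cons] at hdel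
          have hba : b ≠ a := fun e => hne (by rw [e, hdel])
          have hab : a ≠ b := fun e => hba e.symm
          have h0 : (t1.zip t1).countP (fun ab => decide (ab.1 ≠ ab.2)) = 0 :=
            ((pvZipCount_zero t1 t1).mpr rfl).2
          have hd1 : (decide (a ≠ b) : Bool) = true := decide_eq_true hab
          refine ⟨by rw [hdel], ?_⟩
          rw [hdel, hd1, if_pos rfl, h0]
        | succ q =>
          rw [pvDel_cons_succ, pvDel_cons_succ] at hdel
          injection hdel with hba hd
          have ht : t2 ≠ t1 := fun e => hne (by rw [e, hba])
          obtain ⟨hlen, hcnt⟩ := (ih t2 ht).mp ⟨q, by omega, by omega, hd⟩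
          refine ⟨by omega, ?_⟩
          have hz : (decide (a ≠ b) : Bool) = false := by simp [hba]
          rw [hz, if_neg Bool.false_ne_true, Nat.add_zero, hcnt]
      · rintro ⟨hl, hc⟩
        by_cases hab : a = b
        · subst hab
          replace hc : (t1.zip t2).countP (fun ab => decide (ab.1 ≠ ab.2)) = 1 := by
            have hz : (decide (a ≠ a) : Bool) = false := by simp
            rw [hz, if_neg Bool.false_ne_true, Nat.add_zero] at hc
            exact hc
          have ht : t2 ≠ t1 := fun e => hne (by rw [e])
          obtain ⟨q, h1, h2, hd⟩ := (ih t2 ht).mpr ⟨by omega, hc⟩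
          exact ⟨q + 1, by omega, by omega, by rw [pvDel_cons_succ, pvDel_cons_succ, hd]⟩
        · replace hc : (t1.zip t2).countP (fun ab => decide (ab.1 ≠ ab.2)) = 0 := by
            have hd1 : (decide (a ≠ b) : Bool) = true := decide_eq_true hab
            rw [hd1, if_pos rfl] at hc
            omega
          have ht : t2 = t1 := (pvZipCount_zero t1 t2).mp ⟨by omega, hc⟩
          exact ⟨0, by omega, by omega, by rw [pvDel_zero_cons, pvDel_zero_cons, ht]⟩

theorem pvOneChar_eq (bc cb : String) (hne : cb ≠ bc) :
    (List.range bc.toList.length).any (fun p => pvKeyMatch (p, pvDel bc.toList p) cb)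
      = is_one_char_different bc cb := by
  have hl : cb.toList ≠ bc.toList := fun e => hne (by
    have h2 := congrArg String.ofList e
    simpa using h2)
  unfold is_one_char_different
  rw [PySem.List.foldl_ite_add_one (fun ab : Char × Char => ab.1 ≠ ab.2)]
  rw [Bool.eq_iff_iff]
  simp only [List.any_eq_true, List.mem_range, pvKeyMatch, decide_eq_true_eq]
  rw [show (∃ p, p < bc.toList.length ∧ p < cb.toList.length ∧ pvDel cb.toList p = pvDel bc.toList p)
      ↔ _ from pvOneDiff_iff bc.toList cb.toList hl]
  by_cases hlen : bc.toList.length = cb.toList.length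
  · rw [if_neg (by simp only [PySem.Str.len_eq, ne_eq, Int.natCast_inj, not_not]; exact hlen)]
    simp only [beq_iff_eq]
    constructor
    · rintro ⟨-, hc⟩; omega
    · intro h2; exact ⟨hlen, by omega⟩
  · rw [if_pos (by simp only [PySem.Str.len_eq, ne_eq, Int.natCast_inj]; exact hlen)]
    simp only [Bool.false_eq_true, iff_false, not_and]
    intro he
    exact absurd he hlen

theorem pvCorrect_eq (cands : List String) (bc : String) :
    pvCorrect (PySem.Set.ofList cands) (pvBuildIndex cands) bc = pvACorrect cands bc := by
  unfold pvCorrect pvACorrect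
  by_cases hmem : bc ∈ cands
  · have h1 : PySem.Set.contains (PySem.Set.ofList cands) bc = true := by
      rw [PySem.Set.contains_iff]
      exact (PySem.Set.mem_ofList cands bc).mpr hmem
    have h2 : cands.contains bc = true := by simpa using hmem
    rw [if_pos h1, if_pos h2]
  · have h1 : PySem.Set.contains (PySem.Set.ofList cands) bc = false := by
      rw [Bool.eq_false_iff]
      intro he
      exact hmem ((PySem.Set.mem_ofList cands bc).mp ((PySem.Set.contains_iff _ _).mp he))
    have h2 : cands.contains bc = false := by simpa using hmem
    rw [h1, h2]
    simp only [Bool.false_eq_true, if_false]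
    simp only [pvBuildIndex_get?]
    rw [show (none : Option (Nat × String))
        = ((cands.zipIdx.find? (fun _ => false)).map (fun cj => (cj.2, cj.1))) by simp]
    rw [pvFoldBest cands.zipIdx (pvZipIdx_pairwise cands 0)
        (fun p cj => pvKeyMatch (p, pvDel bc.toList p) cj.1) _ (fun _ => false)]
    have hcong : ∀ c ∈ cands.zipIdx 0, ((false : Bool)
          || (List.range bc.toList.length).any (fun p => pvKeyMatch (p, pvDel bc.toList p) c.1))
        = is_one_char_different bc c.1 := by
      intro c hc
      rw [Bool.false_or]
      refine pvOneChar_eq bc c.1 (fun e => hmem ?_)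
      rw [← e]
      exact (pvMem_zipIdx cands 0 c hc).1
    rw [pvFind?_congr _ _ _ hcong, Option.map_map]
    exact pvFind?_zipIdx cands (fun cb => is_one_char_different bc cb) 0

theorem pvStep_eq (cands : List String) (d : PySem.Dict String (List String)) (l0 l1 : String) :
    pvAStep cands d l0 l1 =
      (let name := PySem.Str.strip l0
       let seq := PySem.Str.strip l1
       let parts := [pvCorrect (PySem.Set.ofList cands) (pvBuildIndex cands)
                        (PySem.Str.slice seq (some 76) (some 84)),
                     pvCorrect (PySem.Set.ofList cands) (pvBuildIndex cands)
                        (PySem.Str.slice seq (some 38) (some 46)),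
                     pvCorrect (PySem.Set.ofList cands) (pvBuildIndex cands)
                        (PySem.Str.slice seq (some 0) (some 8))]
       if parts.all (fun c => match c with | some s => !(s == "") | none => false) then
         d.modify (PySem.Str.join "" (parts.filterMap id)) []
           (· ++ [String.ofList ((PySem.Chars.splitOn (name.toList.dropWhile (· == '@')) [' ']).headD [])])
       else d) := by
  have hstep : (fun (acc : List (Option String)) bc =>
      if cands.contains bc then acc ++ [some bc]
      else acc ++ [cands.find? (fun cb => is_one_char_different bc cb)])
      = (fun acc bc => acc ++ [pvACorrect cands bc]) := by
    funext acc bc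
    unfold pvACorrect
    by_cases h : cands.contains bc = true
    · rw [if_pos h, if_pos h]
    · rw [if_neg h, if_neg h]
  unfold pvAStep
  simp only [hstep, PySem.List.foldl_append_singleton_eq_map, List.nil_append,
    List.map_cons, List.map_nil, pvCorrect_eq]

theorem pvALoop_cons (lines cands : List String) (i : Int) (rest : List Int)
    (d : PySem.Dict String (List String)) :
    pvALoop lines cands (i :: rest) d
      = match PySem.List.pyGet? lines i, PySem.List.pyGet? lines (i + 1) with
        | some l0, some l1 => pvALoop lines cands rest (pvAStep cands d l0 l1)
        | _, _ => d := rfl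

theorem pvRange4_cons (a b : Int) (h : a < b) :
    PySem.List.pyRange a b 4 = a :: PySem.List.pyRange (a + 4) b 4 := by
  rw [PySem.List.pyRange_of_pos _ _ (by norm_num : (0:Int) < 4),
      PySem.List.pyRange_of_pos _ _ (by norm_num : (0:Int) < 4)]
  rw [if_pos h]
  by_cases h4 : a + 4 < b
  · rw [if_pos h4]
    have e1 : ((b - a + 4 - 1) / 4).toNat = ((b - (a + 4) + 4 - 1) / 4).toNat + 1 := by omega
    rw [e1, List.range_succ_eq_map, List.map_cons, List.map_map]
    congr 1
    · norm_num
    · exact List.map_congr_left (fun x _ => by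
        simp only [Function.comp, Nat.succ_eq_add_one]
        push_cast
        ring)
  · rw [if_neg h4]
    have e1 : ((b - a + 4 - 1) / 4).toNat = 1 := by omega
    rw [e1]
    simp [List.range_one]

theorem pvLoop_eq (lines candidate_barcodes : List String) :
    ∀ (n k : Nat) (d : PySem.Dict String (List String)), lines.length ≤ 4 * k + n →
      pvALoop lines candidate_barcodes
          (PySem.List.pyRange (4 * (k : Int)) (PySem.List.len lines) 4) d
        = pvBLoop lines (PySem.Set.ofList candidate_barcodes) (pvBuildIndex candidate_barcodes) k d := by
  intro n
  induction n with
  | zero =>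
    intro k d h
    have hA : ¬ ((4 * (k:Int)) < PySem.List.len lines) := by
      rw [PySem.List.len_eq]; omega
    rw [PySem.List.pyRange_of_pos _ _ (by norm_num : (0:Int) < 4), if_neg hA]
    rw [pvBLoop, dif_neg (by omega)]
    rfl
  | succ n ih =>
    intro k d h
    by_cases h1 : 4 * k + 1 < lines.length
    · have hA : (4 * (k:Int)) < PySem.List.len lines := by
        rw [PySem.List.len_eq]; omega
      rw [pvRange4_cons _ _ hA, pvALoop_cons]
      have g0 : PySem.List.pyGet? lines (4 * (k:Int)) = some (lines[4 * k]'(by omega)) := by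
        have e : (4 * (k:Int)) = ((4 * k : Nat) : Int) := by omega
        rw [e, PySem.List.pyGet?_natCast, List.getElem?_eq_getElem (by omega)]
      have g1 : PySem.List.pyGet? lines (4 * (k:Int) + 1) = some (lines[4 * k + 1]'h1) := by
        have e : (4 * (k:Int) + 1) = ((4 * k + 1 : Nat) : Int) := by omega
        rw [e, PySem.List.pyGet?_natCast, List.getElem?_eq_getElem h1]
      rw [g0, g1]
      dsimp only
      rw [pvStep_eq]
      conv_rhs => rw [pvBLoop]
      rw [dif_pos h1]
      have e4 : (4 * (k:Int) + 4) = (4 * ((k + 1 : Nat) : Int)) := by push_cast; ring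
      rw [e4]
      exact ih (k + 1) _ (by omega)
    · by_cases h0 : 4 * k < lines.length
      · have hA : (4 * (k:Int)) < PySem.List.len lines := by
          rw [PySem.List.len_eq]; omega
        rw [pvRange4_cons _ _ hA, pvALoop_cons]
        have g0 : PySem.List.pyGet? lines (4 * (k:Int)) = some (lines[4 * k]'h0) := by
          have e : (4 * (k:Int)) = ((4 * k : Nat) : Int) := by omega
          rw [e, PySem.List.pyGet?_natCast, List.getElem?_eq_getElem h0]
        have g1 : PySem.List.pyGet? lines (4 * (k:Int) + 1) = none := by
          have e : (4 * (k:Int) + 1) = ((4 * k + 1 : Nat) : Int) := by omega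
          rw [e, PySem.List.pyGet?_natCast, List.getElem?_eq_none (by omega)]
        rw [g0, g1]
        rw [pvBLoop, dif_neg h1]
      · have hA : ¬ ((4 * (k:Int)) < PySem.List.len lines) := by
          rw [PySem.List.len_eq]; omega
        rw [PySem.List.pyRange_of_pos _ _ (by norm_num : (0:Int) < 4), if_neg hA]
        rw [pvBLoop, dif_neg (by omega)]
        rfl

-- ===== VERDICT (by name: the statement is the Claim_ definition above) =====
theorem process_fastq_chunk_spec : Claim_equal_process_fastq_chunk := by
  intro lines candidate_barcodes _
  unfold Spec_process_fastq_chunk process_fastq_chunk process_fastq_chunk_alt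
  have h := pvLoop_eq lines candidate_barcodes lines.length 0 PySem.Dict.empty (by omega)
  have h2 := congrArg PySem.Dict.items h
  simpa using h2
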